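-- pv_equiv track=rewrite | github.com/manaswini1869/dsa101 | Contests/Minimum Prefix Removal to Make Array Strictly Increasing.py | minimumPrefixLength
-- ===== SOURCE A (Python) =====
-- from typing import List
--
-- def minimumPrefixLength(nums: List[int]) -> int:
--
--     n = len(nums)
--     if n < 2:
--         return 0
--
--     pre = nums[-1]
--
--     for i in range(n-2, -1, -1):
--         if nums[i] < pre:
--             pre = nums[i]
--         else:
--             return i+1
--
--     return 0
-- ===== SOURCE B (Python) =====
-- def minimumPrefixLength(nums):
--     ans = 0
--     for i in range(1, len(nums)):
--         if nums[i - 1] >= nums[i]: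
--             ans = i
--     return ans
-- ===== Notes on version B (the rewrite author's own statement) =====
-- stated objective: simpler
-- what changed: Replaces the backward scan with a running minimum and early return by a single forward pass that records the last index where the strict increase breaks, returning that index.
import Mathlib
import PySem

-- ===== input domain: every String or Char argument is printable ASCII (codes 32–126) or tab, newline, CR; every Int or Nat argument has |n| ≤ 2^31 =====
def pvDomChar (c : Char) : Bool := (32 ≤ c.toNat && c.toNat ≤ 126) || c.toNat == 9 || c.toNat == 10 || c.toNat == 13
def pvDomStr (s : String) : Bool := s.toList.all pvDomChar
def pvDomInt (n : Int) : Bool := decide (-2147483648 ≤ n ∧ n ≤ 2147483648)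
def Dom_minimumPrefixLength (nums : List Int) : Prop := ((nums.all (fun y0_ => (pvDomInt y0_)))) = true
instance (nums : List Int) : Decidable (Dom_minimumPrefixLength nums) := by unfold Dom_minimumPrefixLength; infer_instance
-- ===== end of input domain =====

-- B replaces A's backward scan with a running minimum and early return by a single
-- forward pass recording the last index where the strict increase breaks (objective: simpler).

-- ===== PORT A =====
-- A's loop `for i in range(n-2, -1, -1)` as structural recursion counting i down;
-- all indices are in range, so getD is exact (including pre = nums[-1] = nums[n-1]).
def minimumPrefixLengthGo (nums : List Int) (pre : Int) : Nat → Int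
  | 0 => if nums.getD 0 0 < pre then 0 else (0 : Int) + 1
  | i + 1 =>
    if nums.getD (i + 1) 0 < pre then minimumPrefixLengthGo nums (nums.getD (i + 1) 0) i
    else ((i : Int) + 1) + 1

def minimumPrefixLength (nums : List Int) : Int :=
  if nums.length < 2 then 0
  else minimumPrefixLengthGo nums (nums.getD (nums.length - 1) 0) (nums.length - 2)

-- ===== PORT B =====
-- forward pass over range(1, len(nums)); indices i ≥ 1 are in range, getD is exact
def minimumPrefixLength_alt (nums : List Int) : Int :=
  (PySem.List.pyRange 1 nums.length 1).foldl
    (fun ans i => if nums.getD (i - 1).toNat 0 ≥ nums.getD i.toNat 0 then i else ans) 0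

-- ===== PRECONDITION & SPEC =====
def Spec_minimumPrefixLength (nums : List Int) (out : Int) : Prop := out = minimumPrefixLength_alt nums
instance (nums : List Int) (out : Int) : Decidable (Spec_minimumPrefixLength nums out) := by unfold Spec_minimumPrefixLength; infer_instance

-- ===== CLAIM (what is proved, stated in full; the proofs are below) =====
def Claim_equal_minimumPrefixLength : Prop := ∀ (nums : List Int), Dom_minimumPrefixLength nums → Spec_minimumPrefixLength nums (minimumPrefixLength nums)

-- ===== LEMMAS AND PROOFS =====

lemma go_eq_fold (nums : List Int) : ∀ i : Nat,
    minimumPrefixLengthGo nums (nums.getD (i + 1) 0) i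
      = (PySem.List.pyRange 1 ((i : Int) + 2) 1).foldl
          (fun ans j => if nums.getD (j - 1).toNat 0 ≥ nums.getD j.toNat 0 then j else ans) 0 := by
  intro i
  induction i with
  | zero =>
    rw [show (((0:Nat) : Int) + 2) = 1 + 1 by norm_num, PySem.List.pyRange_one_singleton]
    simp [minimumPrefixLengthGo]
    split_ifs with h1 h2 <;> omega
  | succ i ih =>
    rw [show (((i + 1 : Nat) : Int) + 2) = (1 + ((i : Int) + 1)) + 1 by push_cast; ring,
      PySem.List.pyRange_one_succ_right (by omega)]
    rw [List.foldl_append]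
    simp only [List.foldl_cons, List.foldl_nil]
    have h1 : ((1 : Int) + ((i : Int) + 1) - 1).toNat = i + 1 := by omega
    have h2 : ((1 : Int) + ((i : Int) + 1)).toNat = i + 2 := by omega
    rw [h1, h2]
    simp only [minimumPrefixLengthGo]
    by_cases h : nums.getD (i + 1) 0 < nums.getD (i + 2) 0
    · rw [if_pos h, if_neg (by omega), show ((1 : Int) + ((i : Int) + 1)) = ((i : Int) + 2) by ring]
      exact ih
    · rw [if_neg h, if_pos (by omega)]
      ring

-- ===== VERDICT (by name: the statement is the Claim_ definition above) =====
theorem minimumPrefixLength_spec : Claim_equal_minimumPrefixLength := by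
  intro nums _
  unfold Spec_minimumPrefixLength minimumPrefixLength minimumPrefixLength_alt
  by_cases hn : nums.length < 2
  · rw [if_pos hn, PySem.List.pyRange_one_eq_nil (by exact_mod_cast by omega : (nums.length : Int) ≤ 1)]
    simp
  · rw [if_neg hn]
    have h2 : 2 ≤ nums.length := by omega
    have := go_eq_fold nums (nums.length - 2)
    rw [show nums.length - 2 + 1 = nums.length - 1 by omega] at this
    rw [this, show (((nums.length - 2 : Nat) : Int) + 2) = (nums.length : Int) by omega]
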